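-- pv_equiv track=rewrite | github.com/Kdixter/Kabir_Vohra_Urvashi_Balasubraniam_A1 | life_expectancy_task/src/test_poly.py | build_poly_feature_map
-- ===== SOURCE A (Python) =====
-- from itertools import combinations_with_replacement
-- from typing import Tuple, List
--
-- def build_poly_feature_map(base_features: List[str], degree: int) -> List[tuple]:
-- 	index_map = list(range(len(base_features)))
-- 	terms = []
-- 	for d in range(1, degree + 1):
-- 		for combo in combinations_with_replacement(index_map, d):
-- 			name_tuple = tuple(base_features[i] for i in combo)
-- 			terms.append((combo, name_tuple))
-- 	return terms
-- ===== SOURCE B (Python) =====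
-- from typing import List
--
-- def build_poly_feature_map(base_features: List[str], degree: int) -> List[tuple]:
--     n = len(base_features)
--
--     def gen(start: int, remaining: int) -> List[tuple]:
--         # yields (index_tuple, name_tuple) pairs directly, built during recursion
--         if remaining == 0:
--             return [((), ())]
--         res = []
--         for i in range(start, n):
--             for idxs, names in gen(i, remaining - 1):
--                 res.append(((i,) + idxs, (base_features[i],) + names))
--         return res
--
--     out = []
--     for d in range(1, degree + 1):
--         out.extend(gen(0, d))
--     return out
-- ===== Notes on version B (the rewrite author's own statement) =====
-- stated objective: alternative
-- what changed: Replaced the itertools.combinations_with_replacement call (indices first, names mapped afterwards) with a hand-written recursive generator over (start, remaining) that builds the index tuple and name tuple together during the recursion.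
import Mathlib
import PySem

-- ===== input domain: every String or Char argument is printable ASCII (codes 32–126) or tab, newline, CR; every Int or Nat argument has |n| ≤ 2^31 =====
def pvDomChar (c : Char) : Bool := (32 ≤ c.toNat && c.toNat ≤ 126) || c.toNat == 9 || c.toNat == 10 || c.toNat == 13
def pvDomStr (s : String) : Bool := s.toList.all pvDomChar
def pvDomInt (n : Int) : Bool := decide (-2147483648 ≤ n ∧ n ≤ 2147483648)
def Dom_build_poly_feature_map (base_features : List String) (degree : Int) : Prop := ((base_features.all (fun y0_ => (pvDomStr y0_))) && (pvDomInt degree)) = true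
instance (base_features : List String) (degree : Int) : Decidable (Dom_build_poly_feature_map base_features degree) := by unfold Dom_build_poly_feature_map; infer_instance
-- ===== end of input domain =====

-- B replaces the combinations_with_replacement library call by an explicit recursion on
-- (start index, remaining length) that builds index tuple and name tuple together (objective: alternative).
-- ===== PORT A =====
-- port of itertools.combinations_with_replacement on a list pool, in yield (lexicographic) order
def pvCwr (xs : List Int) (d : Nat) : List (List Int) :=
  match d, xs with
  | 0, _ => [[]]
  | _ + 1, [] => []
  | d + 1, x :: rest =>
      (pvCwr (x :: rest) d).map (fun c => x :: c) ++ pvCwr rest (d + 1)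
termination_by (d, xs.length)

def build_poly_feature_map (base_features : List String) (degree : Int) : List (List Int × List String) :=
  let index_map : List Int := (List.range base_features.length).map Int.ofNat
  (PySem.List.pyRange 1 (degree + 1) 1).foldl
    (fun terms d =>
      (pvCwr index_map d.toNat).foldl
        (fun terms combo =>
          terms ++ [(combo, combo.map (fun i => base_features.getD i.toNat ""))])
        terms)
    []

-- ===== PORT B =====
-- gen(start, remaining) from Source B: pairs (index suffix, name suffix), built during the recursion
def pvGen (base_features : List String) (start : Nat) (remaining : Nat) : List (List Int × List String) :=
  match remaining with
  | 0 => [([], [])]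
  | r + 1 =>
      (List.range' start (base_features.length - start)).flatMap
        (fun i => (pvGen base_features i r).map
          (fun p => ((i : Int) :: p.1, base_features.getD i "" :: p.2)))

def build_poly_feature_map_alt (base_features : List String) (degree : Int) : List (List Int × List String) :=
  (PySem.List.pyRange 1 (degree + 1) 1).foldl
    (fun out d => out ++ pvGen base_features 0 d.toNat) []

-- ===== PRECONDITION & SPEC =====
def Spec_build_poly_feature_map (base_features : List String) (degree : Int) (out : List (List Int × List String)) : Prop := out = build_poly_feature_map_alt base_features degree
instance (base_features : List String) (degree : Int) (out : List (List Int × List String)) : Decidable (Spec_build_poly_feature_map base_features degree out) := by unfold Spec_build_poly_feature_map; infer_instance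

-- ===== CLAIM (what is proved, stated in full; the proofs are below) =====
def Claim_equal_build_poly_feature_map : Prop := ∀ (base_features : List String) (degree : Int), Dom_build_poly_feature_map base_features degree → Spec_build_poly_feature_map base_features degree (build_poly_feature_map base_features degree)

-- ===== LEMMAS AND PROOFS =====

-- Core invariant: mapping A's name-building function over the combinations of the
-- index suffix [s, len) of degree r gives exactly B's gen(s, r).
theorem pvCwr_map_eq_pvGen (bf : List String) :
    ∀ (r k s : Nat), bf.length = s + k →
      (pvCwr ((List.range' s k).map Int.ofNat) r).map
        (fun c => (c, c.map (fun i : Int => bf.getD i.toNat ""))) = pvGen bf s r := by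
  intro r
  induction r with
  | zero => intro k s h; simp [pvCwr, pvGen]
  | succ r ih =>
    intro k
    induction k with
    | zero =>
      intro s h
      have h0 : bf.length - s = 0 := by omega
      simp [pvCwr, pvGen, h0]
    | succ k ihk =>
      intro s h
      have hlen : bf.length - s = k + 1 := by omega
      rw [List.range'_succ, List.map_cons, pvCwr]
      rw [pvGen, hlen, List.range'_succ, List.flatMap_cons]
      rw [List.map_append]
      congr 1
      · rw [← ih (k + 1) s h, List.map_map, List.map_map]
        apply List.map_congr_left
        intro c _
        simp
      · have h' : bf.length = (s + 1) + k := by omega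
        have h2 : bf.length - (s + 1) = k := by omega
        rw [ihk (s + 1) h', pvGen, h2]

-- ===== VERDICT (by name: the statement is the Claim_ definition above) =====
theorem build_poly_feature_map_spec : Claim_equal_build_poly_feature_map := by
  intro bf deg _
  show build_poly_feature_map bf deg = build_poly_feature_map_alt bf deg
  unfold build_poly_feature_map build_poly_feature_map_alt
  simp only [PySem.List.foldl_append_singleton_eq_map, PySem.List.foldl_append_eq_flatMap,
    List.nil_append]
  apply List.flatMap_congr ?_
  intro d _
  rw [List.range_eq_range']
  exact pvCwr_map_eq_pvGen bf d.toNat bf.length 0 (by omega)
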